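-- pv_equiv track=rewrite | github.com/rajput-shivam/BSC-CS-Sem4-LinearAlgerbraPracticals | InverseMatrix.py | adjointMatrix
-- ===== SOURCE A (Python) =====
-- def coFactor(mat,row,col):
--     minor=[]
--     for i in range(len(mat)):
--         for j in range(len(mat[0])):
--             if not (i==row or j==col):
--                 minor.append(mat[i][j])
--     return (minor[0]*minor[3])-(minor[1]*minor[2])
--
-- def adjointMatrix(m,order):
--     if order==2:
--         n=[[0,0,],[0,0]]
--         n[0][0],n[0][1],n[1][0],n[1][1]=m[1][1],-m[1][0],-m[0][1],m[0][0]
--         return transpose(n)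
--     if order==3:
--         n=[[0,0,0],[0,0,0],[0,0,0]]
--         for i in range(len(m)):
--             for j in range(len(m[0])):
--                 n[i][j]= ((-1)**(i+j))*coFactor(m,i,j)
--         return transpose(n)
--
-- def transpose(m):
--     tra=[]
--     for i in range(len(m)):
--         row=[]
--         for j in range(len(m[0])):
--             element=m[j][i]
--             row.append(element)
--         tra.append(row)
--     return tra
-- ===== SOURCE B (Python) =====
-- def adjointMatrix(m, order):
--     # Cayley-Hamilton: adj(M) = M^2 - tr(M)*M + e2*I (3x3), adj(M) = tr(M)*I - M (2x2).
--     if order != 2 and order != 3: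
--         return None
--     M = [row[:order] for row in m[:order]]
--     t = sum(M[k][k] for k in range(order))
--     if order == 2:
--         return [[t * (i == j) - M[i][j] for j in range(2)] for i in range(2)]
--     M2 = [[sum(M[i][k] * M[k][j] for k in range(3)) for j in range(3)]
--           for i in range(3)]
--     t2 = sum(M2[k][k] for k in range(3))
--     e2 = (t * t - t2) // 2
--     return [[M2[i][j] - t * M[i][j] + e2 * (i == j) for j in range(3)]
--             for i in range(3)]
-- ===== Notes on version B (the rewrite author's own statement) =====
-- stated objective: alternative
-- what changed: Replaces A's cofactor/minor expansion (hardcoded 2x2 formula, fixed-4-element coFactor helper, mutation of a zero matrix, separate transpose pass) by the Cayley-Hamilton trace identities: adj(M) = tr(M)*I - M for 2x2 and adj(M) = M^2 - tr(M)*M + ((tr(M)^2 - tr(M^2))//2)*I for 3x3, computed from matrix powers and traces with no minors and no transpose.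
-- outside the precondition, e.g. on adjointMatrix([], 3): A returns [[0, 0, 0], [0, 0, 0], [0, 0, 0]], B raises IndexError; on adjointMatrix([[], [1, 2, 3]], 3): A returns [[0, 0, 0], [0, 0, 0], [0, 0, 0]], B raises IndexError
import Mathlib
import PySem

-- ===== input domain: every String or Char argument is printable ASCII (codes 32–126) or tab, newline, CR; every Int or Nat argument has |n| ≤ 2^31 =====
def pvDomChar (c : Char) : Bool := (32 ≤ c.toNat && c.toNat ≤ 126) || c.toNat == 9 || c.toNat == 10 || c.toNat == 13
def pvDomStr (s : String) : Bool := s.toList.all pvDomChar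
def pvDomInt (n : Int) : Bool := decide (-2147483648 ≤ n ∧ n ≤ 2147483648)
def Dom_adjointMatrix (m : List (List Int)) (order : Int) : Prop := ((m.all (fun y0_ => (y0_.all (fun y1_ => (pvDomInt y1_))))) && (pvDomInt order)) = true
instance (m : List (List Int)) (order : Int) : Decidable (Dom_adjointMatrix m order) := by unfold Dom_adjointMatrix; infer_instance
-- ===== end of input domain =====

-- B replaces A's cofactor/minor expansion and transpose pass by the Cayley–Hamilton trace
-- identities adj(M) = tr(M)·I − M (2×2) and adj(M) = M² − tr(M)·M + e2·I (3×3).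
-- Objective: alternative algorithm; equality of RETURN values on Pre_.

-- ===== PORT A =====
-- indexing uses PySem.List.pyGetD: exact wherever the index is in range, which Pre_ guarantees
-- on every reachable access (Python raises IndexError outside Pre_).
def coFactorA (mat : List (List Int)) (row col : Nat) : Int :=
  let minor : List Int :=
    (List.range mat.length).foldl (fun acc i =>
      (List.range (mat.headD []).length).foldl (fun acc2 j =>
        if ¬ (i = row ∨ j = col) then
          acc2 ++ [PySem.List.pyGetD (PySem.List.pyGetD mat (i : Int) []) (j : Int) 0]
        else acc2) acc) []
  (PySem.List.pyGetD minor 0 0 * PySem.List.pyGetD minor 3 0) -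
    (PySem.List.pyGetD minor 1 0 * PySem.List.pyGetD minor 2 0)

def transposeA (m : List (List Int)) : List (List Int) :=
  (List.range m.length).foldl (fun tra i =>
    tra ++ [(List.range (m.headD []).length).foldl (fun row j =>
      row ++ [PySem.List.pyGetD (PySem.List.pyGetD m (j : Int) []) (i : Int) 0]) []]) []

def adjointMatrix (m : List (List Int)) (order : Int) : Option (List (List Int)) :=
  if order = 2 then
    let n := [[PySem.List.pyGetD (PySem.List.pyGetD m 1 []) 1 0,
               -(PySem.List.pyGetD (PySem.List.pyGetD m 1 []) 0 0)],
              [-(PySem.List.pyGetD (PySem.List.pyGetD m 0 []) 1 0),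
               PySem.List.pyGetD (PySem.List.pyGetD m 0 []) 0 0]]
    some (transposeA n)
  else if order = 3 then
    let n0 : List (List Int) := [[0,0,0],[0,0,0],[0,0,0]]
    -- n[i][j] = ... : in-place update, in range under Pre_ (Python raises outside)
    let n := (List.range m.length).foldl (fun n i =>
      (List.range (m.headD []).length).foldl (fun n j =>
        n.modify i (fun r => r.set j (((-1 : Int)) ^ (i + j) * coFactorA m i j))) n) n0
    some (transposeA n)
  else none

-- ===== PORT B =====
def adjointMatrix_alt (m : List (List Int)) (order : Int) : Option (List (List Int)) :=
  if order ≠ 2 ∧ order ≠ 3 then none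
  else
    let M : List (List Int) :=
      (PySem.List.slice m none (some order)).map (fun row => PySem.List.slice row none (some order))
    let t : Int := ((List.range order.toNat).map (fun k =>
      PySem.List.pyGetD (PySem.List.pyGetD M (k : Int) []) (k : Int) 0)).sum
    if order = 2 then
      some ((List.range 2).map (fun i => (List.range 2).map (fun j =>
        t * (if i = j then 1 else 0) -
          PySem.List.pyGetD (PySem.List.pyGetD M (i : Int) []) (j : Int) 0)))
    else
      let M2 : List (List Int) := (List.range 3).map (fun i => (List.range 3).map (fun j =>
        ((List.range 3).map (fun k =>
          PySem.List.pyGetD (PySem.List.pyGetD M (i : Int) []) (k : Int) 0 *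
          PySem.List.pyGetD (PySem.List.pyGetD M (k : Int) []) (j : Int) 0)).sum))
      let t2 : Int := ((List.range 3).map (fun k =>
        PySem.List.pyGetD (PySem.List.pyGetD M2 (k : Int) []) (k : Int) 0)).sum
      let e2 : Int := PySem.Int.floordiv (t * t - t2) 2
      some ((List.range 3).map (fun i => (List.range 3).map (fun j =>
        PySem.List.pyGetD (PySem.List.pyGetD M2 (i : Int) []) (j : Int) 0 -
          t * PySem.List.pyGetD (PySem.List.pyGetD M (i : Int) []) (j : Int) 0 +
          e2 * (if i = j then 1 else 0))))

-- ===== PRECONDITION & SPEC =====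
-- Pre_ excludes exactly (a) the inputs on which A raises IndexError (matrix smaller/raggeder
-- than the stated order), and (b) order=3 with m=[] or m[0]=[], where A's loops never run and
-- it returns its leftover all-zeros initial matrix — an artefact of A's implementation on which
-- the natural B raises IndexError.
def Pre_adjointMatrix (m : List (List Int)) (order : Int) : Prop :=
  (order = 2 → 2 ≤ m.length ∧ 2 ≤ (m.getD 0 []).length ∧ 2 ≤ (m.getD 1 []).length) ∧
  (order = 3 → m.length = 3 ∧ (m.getD 0 []).length = 3 ∧ ∀ r ∈ m, 3 ≤ r.length)
instance (m : List (List Int)) (order : Int) : Decidable (Pre_adjointMatrix m order) := by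
  unfold Pre_adjointMatrix; infer_instance

def pvWitness_adjointMatrix : List (List Int) × Int := ([[1,2,3],[4,5,6],[7,8,10]], 3)

def Spec_adjointMatrix (m : List (List Int)) (order : Int) (out : Option (List (List Int))) : Prop := out = adjointMatrix_alt m order
instance (m : List (List Int)) (order : Int) (out : Option (List (List Int))) : Decidable (Spec_adjointMatrix m order out) := by unfold Spec_adjointMatrix; infer_instance

-- ===== CLAIM (what is proved, stated in full; the proofs are below) =====
def Claim_equal_adjointMatrix : Prop := ∀ (m : List (List Int)) (order : Int), Dom_adjointMatrix m order → Pre_adjointMatrix m order → Spec_adjointMatrix m order (adjointMatrix m order)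

-- ===== LEMMAS AND PROOFS =====

def pvToNat3 : Int.toNat 3 = 3 := rfl
def pvToNat2 : Int.toNat 2 = 2 := rfl

-- A's 2×2 branch on the shape Pre_ guarantees
theorem adjA_two (a b c d : Int) (ta tb : List Int) (rest : List (List Int)) :
    adjointMatrix ((a::b::ta)::(c::d::tb)::rest) 2 = some [[d, -b], [-c, a]] := by
  simp only [adjointMatrix, reduceIte]
  simp only [transposeA, List.length_cons, List.length_nil, List.range_succ, List.range_zero,
    List.headD_cons, List.nil_append, List.cons_append, pysem]
  norm_num [List.flatMap_cons, List.flatMap_nil, pysem]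

-- B's 2×2 branch (Cayley–Hamilton tr(M)·I − M) reduces to the same literal
theorem adjB_two (a b c d : Int) (ta tb : List Int) (rest : List (List Int)) :
    adjointMatrix_alt ((a::b::ta)::(c::d::tb)::rest) 2 = some [[d, -b], [-c, a]] := by
  simp [adjointMatrix_alt, PySem.List.slice_to, pvToNat2, List.range_succ,
    PySem.List.pyGetD, PySem.List.pyGet?, PySem.List.pyIdx?]

-- A's 3×3 branch on the shape Pre_ guarantees: assembled from the nine cofactors
set_option maxHeartbeats 1600000 in
theorem adjA_three (a b c d e f g h i : Int) (t1 t2 : List Int) :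
    adjointMatrix [[a,b,c], d::e::f::t1, g::h::i::t2] 3 =
      some [[e*i-f*h, c*h-b*i, b*f-c*e],
            [f*g-d*i, a*i-c*g, c*d-a*f],
            [d*h-e*g, b*g-a*h, a*e-b*d]] := by
  have hcf : ∀ r0 c0 : Nat, r0 < 3 → c0 < 3 →
      coFactorA [[a,b,c], d::e::f::t1, g::h::i::t2] r0 c0 =
        [[e*i-f*h, d*i-f*g, d*h-e*g],
         [b*i-c*h, a*i-c*g, a*h-b*g],
         [b*f-c*e, a*f-c*d, a*e-b*d]][r0]!.getD c0 0 := by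
    intro r0 c0 hr hc
    interval_cases r0 <;> interval_cases c0 <;>
      simp [coFactorA, List.range_succ, pvToNat3, pvToNat2,
        PySem.List.pyGetD, PySem.List.pyGet?, PySem.List.pyIdx?]
  have h00 := hcf 0 0 (by omega) (by omega)
  have h01 := hcf 0 1 (by omega) (by omega)
  have h02 := hcf 0 2 (by omega) (by omega)
  have h10 := hcf 1 0 (by omega) (by omega)
  have h11 := hcf 1 1 (by omega) (by omega)
  have h12 := hcf 1 2 (by omega) (by omega)
  have h20 := hcf 2 0 (by omega) (by omega)
  have h21 := hcf 2 1 (by omega) (by omega)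
  have h22 := hcf 2 2 (by omega) (by omega)
  simp only [List.getElem!_cons_zero, List.getElem!_cons_succ, List.getD_cons_zero,
    List.getD_cons_succ] at h00 h01 h02 h10 h11 h12 h20 h21 h22
  simp [adjointMatrix, transposeA, List.range_succ, pvToNat3, pvToNat2,
    h00, h01, h02, h10, h11, h12, h20, h21, h22, List.modify, List.set,
    PySem.List.pyGetD, PySem.List.pyGet?, PySem.List.pyIdx?]

-- B's 3×3 branch: Cayley–Hamilton M² − tr(M)·M + e2·I gives the same adjugate
-- (the numerator of e2 is even, so // is exact division)
set_option maxHeartbeats 1600000 in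
theorem adjB_three (a b c d e f g h i : Int) (t1 t2 : List Int) :
    adjointMatrix_alt [[a,b,c], d::e::f::t1, g::h::i::t2] 3 =
      some [[e*i-f*h, c*h-b*i, b*f-c*e],
            [f*g-d*i, a*i-c*g, c*d-a*f],
            [d*h-e*g, b*g-a*h, a*e-b*d]] := by
  have key : ∀ (X K : Int), X = 2 * K → X / 2 = K := fun X K hXK => by subst hXK; omega
  simp [adjointMatrix_alt, PySem.List.slice_to, pvToNat3, pvToNat2, List.range_succ,
    PySem.List.pyGetD, PySem.List.pyGet?, PySem.List.pyIdx?, PySem.Int.floordiv_eq_ediv_of_pos]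
  rw [key _ (a*e + a*i + e*i - b*d - c*g - f*h) (by ring)]
  and_intros <;> ring

-- ===== VERDICT (by name: the statement is the Claim_ definition above) =====
theorem adjointMatrix_spec : Claim_equal_adjointMatrix := by
  intro m order _ hpre
  unfold Spec_adjointMatrix
  obtain ⟨h2, h3⟩ := hpre
  by_cases ho2 : order = 2
  · subst ho2
    obtain ⟨hl, hr0, hr1⟩ := h2 rfl
    obtain ⟨a, b, ta, c, d, tb, rest, rfl⟩ :
        ∃ a b ta c d tb rest, m = (a :: b :: ta) :: (c :: d :: tb) :: rest := by
      match m, hl, hr0, hr1 with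
      | (a :: b :: ta) :: (c :: d :: tb) :: rest, _, _, _ =>
        exact ⟨a, b, ta, c, d, tb, rest, rfl⟩
    rw [adjA_two, adjB_two]
  · by_cases ho3 : order = 3
    · subst ho3
      obtain ⟨hl, hr0, hrows⟩ := h3 rfl
      obtain ⟨r0, r1, r2, rfl⟩ : ∃ r0 r1 r2, m = [r0, r1, r2] := by
        match m, hl with
        | [r0, r1, r2], _ => exact ⟨r0, r1, r2, rfl⟩
      have l0 : r0.length = 3 := by simpa using hr0
      have l1 : 2 < r1.length := by have := hrows r1 (by simp); omega
      have l2 : 2 < r2.length := by have := hrows r2 (by simp); omega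
      obtain ⟨a, b, c, rfl⟩ : ∃ a b c, r0 = [a, b, c] := by
        match r0, l0 with
        | [a, b, c], _ => exact ⟨a, b, c, rfl⟩
      obtain ⟨d, e, f, t1, rfl⟩ : ∃ d e f t1, r1 = d :: e :: f :: t1 := by
        match r1, l1 with
        | d :: e :: f :: t1, _ => exact ⟨d, e, f, t1, rfl⟩
      obtain ⟨g, h, i, t2, rfl⟩ : ∃ g h i t2, r2 = g :: h :: i :: t2 := by
        match r2, l2 with
        | g :: h :: i :: t2, _ => exact ⟨g, h, i, t2, rfl⟩
      rw [adjA_three, adjB_three]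
    · simp [adjointMatrix, adjointMatrix_alt, ho2, ho3]
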